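-- pv_equiv track=rewrite | github.com/lotooo/adventofcode | 2021/10/test1.py | solve
-- ===== SOURCE A (Python) =====
-- illegal_characters = {
--     ')': 3,
--     ']': 57,
--     '}': 1197,
--     '>': 25137
-- }
--
-- def solve(data):
--     """ Solve the puzzle and return the solution """
--     score = 0
--     for line in data:
--         last_size = 0
--         while last_size != len(line):
--             last_size = len(line)
--             line = line.replace('<>','').replace('[]','').replace('{}','').replace('()','')
--         for i in line:
--             if i in illegal_characters:
--                 score += illegal_characters[i]
--                 break
--     return score
-- ===== SOURCE B (Python) =====
-- illegal_characters = {
--     ')': 3,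
--     ']': 57,
--     '}': 1197,
--     '>': 25137
-- }
--
-- pairs = {'<': '>', '[': ']', '{': '}', '(': ')'}
--
-- def solve(data):
--     """ Solve the puzzle and return the solution """
--     score = 0
--     for line in data:
--         stack = []
--         for ch in line:
--             if stack and pairs.get(stack[-1]) == ch:
--                 stack.pop()
--             else:
--                 stack.append(ch)
--         for ch in stack:
--             if ch in illegal_characters:
--                 score += illegal_characters[ch]
--                 break
--     return score
-- ===== Notes on version B (the rewrite author's own statement) =====
-- stated objective: alternative
-- what changed: A repeatedly rescans each line with four str.replace passes until a fixpoint and then scans for the first illegal closer; B makes a single stack pass per line (pop on a matching adjacent pair, push otherwise) and scans the residual stack bottom-to-top, which is the same reduced string.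
import Mathlib
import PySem

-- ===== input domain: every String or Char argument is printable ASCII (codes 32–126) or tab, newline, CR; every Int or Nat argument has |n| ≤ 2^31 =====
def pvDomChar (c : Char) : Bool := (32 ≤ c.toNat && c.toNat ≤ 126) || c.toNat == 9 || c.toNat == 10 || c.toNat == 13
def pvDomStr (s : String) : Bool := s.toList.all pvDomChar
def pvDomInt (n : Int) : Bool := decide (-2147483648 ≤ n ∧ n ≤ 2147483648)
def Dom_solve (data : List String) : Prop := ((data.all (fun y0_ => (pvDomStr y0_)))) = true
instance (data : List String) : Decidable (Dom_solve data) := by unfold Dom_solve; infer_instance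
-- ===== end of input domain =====

-- B replaces A's repeated str.replace fixpoint reduction by a single stack pass per line; same result on every input.

-- ===== PORT A =====
-- module-level dict illegal_characters
def illegalDict : PySem.Dict Char Int :=
  PySem.Dict.mk [(')', 3), (']', 57), ('}', 1197), ('>', 25137)]

-- one round of line.replace('<>','').replace('[]','').replace('{}','').replace('()','')
def replace4 (l : List Char) : List Char :=
  PySem.Chars.replace (PySem.Chars.replace (PySem.Chars.replace (PySem.Chars.replace
    l ['<', '>'] []) ['[', ']'] []) ['{', '}'] []) ['(', ')'] []

-- proof-level model of one '.replace(oc, "")' pass (also justifies loopA's termination)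
def rep (o c : Char) : List Char → List Char
  | [] => []
  | [x] => [x]
  | x :: y :: t => if x = o ∧ y = c then rep o c t else x :: rep o c (y :: t)

theorem rep_go_eq (o c : Char) : ∀ (fuel : Nat) (l acc : List Char), l.length ≤ fuel →
    PySem.Chars.replace.go [o, c] [] fuel l acc = acc.reverse ++ rep o c l := by
  intro fuel
  induction fuel with
  | zero =>
    intro l acc h
    have : l = [] := List.eq_nil_of_length_eq_zero (Nat.le_zero.mp h)
    subst this
    simp [PySem.Chars.replace.go, rep]
  | succ f ih =>
    intro l acc h
    match l with
    | [] => simp [PySem.Chars.replace.go, rep]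
    | [x] =>
      have hpre : [o, c].isPrefixOf [x] = false := by
        simp [List.isPrefixOf]
      simp only [PySem.Chars.replace.go, hpre]
      rw [ih [] (x :: acc) (by simp)]
      simp [rep]
    | x :: y :: t =>
      by_cases hxy : x = o ∧ y = c
      · obtain ⟨hx, hy⟩ := hxy
        subst hx; subst hy
        have hpre : [x, y].isPrefixOf (x :: y :: t) = true := by
          simp [List.isPrefixOf]
        simp only [PySem.Chars.replace.go, hpre, if_pos]
        have hd : List.drop ([x, y] : List Char).length (x :: y :: t) = t := by simp
        rw [hd, List.reverse_nil, List.nil_append, ih t acc (by simp at h ⊢; omega)]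
        simp [rep]
      · have hpre : [o, c].isPrefixOf (x :: y :: t) = false := by
          simp only [List.isPrefixOf, Bool.and_eq_false_iff]
          rcases Decidable.not_and_iff_or_not.mp hxy with h' | h'
          · left; simp [beq_eq_false_iff_ne]; exact fun e => h' e.symm
          · right; left; simp [beq_eq_false_iff_ne]; exact fun e => h' e.symm
        simp only [PySem.Chars.replace.go, hpre, Bool.false_eq_true, if_false]
        rw [ih (y :: t) (x :: acc) (by simp at h ⊢; omega)]
        simp [rep, hxy]

theorem replace_eq_rep (o c : Char) (l : List Char) :
    PySem.Chars.replace l [o, c] [] = rep o c l := by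
  have : ([o, c] : List Char).isEmpty = false := by simp
  simp only [PySem.Chars.replace, this, Bool.false_eq_true, if_false]
  simpa using rep_go_eq o c l.length l [] (le_refl _)

theorem rep_length_le (o c : Char) : ∀ l : List Char, (rep o c l).length ≤ l.length := by
  intro l
  fun_induction rep o c l with
  | case1 => simp
  | case2 => simp
  | case3 x y t h ih => simp [rep]; omega
  | case4 x y t h ih => simpa [rep] using ih

theorem replace4_length_le (l : List Char) : (replace4 l).length ≤ l.length := by
  unfold replace4
  rw [replace_eq_rep, replace_eq_rep, replace_eq_rep, replace_eq_rep]
  calc (rep '(' ')' (rep '{' '}' (rep '[' ']' (rep '<' '>' l)))).length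
      ≤ (rep '{' '}' (rep '[' ']' (rep '<' '>' l))).length := rep_length_le _ _ _
    _ ≤ (rep '[' ']' (rep '<' '>' l)).length := rep_length_le _ _ _
    _ ≤ (rep '<' '>' l).length := rep_length_le _ _ _
    _ ≤ l.length := rep_length_le _ _ _

-- the 'while last_size != len(line)' loop of A
def loopA (l : List Char) (lastSize : Nat) : List Char :=
  if lastSize = l.length then l
  else loopA (replace4 l) l.length
termination_by 2 * l.length + (if lastSize = l.length then 0 else 1)
decreasing_by
  have := replace4_length_le l
  split_ifs <;> omega

-- 'for i in line: if i in illegal_characters: score += illegal_characters[i]; break'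
def scanA : List Char → Int
  | [] => 0
  | i :: t =>
    match PySem.Dict.get? illegalDict i with
    | some v => v
    | none => scanA t

def solve (data : List String) : Int :=
  data.foldl (fun score line => score + scanA (loopA line.toList 0)) 0

-- ===== PORT B =====
def pairsDict : PySem.Dict Char Char :=
  PySem.Dict.mk [('<', '>'), ('[', ']'), ('{', '}'), ('(', ')')]

-- 'if stack and pairs.get(stack[-1]) == ch: stack.pop() else: stack.append(ch)'
-- (stack kept head-first: head = Python's stack[-1])
def stepB (stack : List Char) (ch : Char) : List Char :=
  match stack with
  | [] => [ch]
  | top :: rest => if PySem.Dict.get? pairsDict top == some ch then rest else ch :: top :: rest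

-- 'for ch in stack: if ch in illegal_characters: score += illegal_characters[ch]; break'
def scanB : List Char → Int
  | [] => 0
  | ch :: t =>
    match PySem.Dict.get? illegalDict ch with
    | some v => v
    | none => scanB t

def solve_alt (data : List String) : Int :=
  data.foldl (fun score line =>
    let stack := line.toList.foldl stepB []
    -- Python iterates the stack bottom-to-top; head-first list reversed
    score + scanB stack.reverse) 0

-- ===== PRECONDITION & SPEC =====
def Spec_solve (data : List String) (out : Int) : Prop := out = solve_alt data
instance (data : List String) (out : Int) : Decidable (Spec_solve data out) := by unfold Spec_solve; infer_instance

-- ===== CLAIM (what is proved, stated in full; the proofs are below) =====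
def Claim_equal_solve : Prop := ∀ (data : List String), Dom_solve data → Spec_solve data (solve data)

-- ===== LEMMAS AND PROOFS =====

theorem pget_eq (t : Char) : PySem.Dict.get? pairsDict t =
    if t = '<' then some '>' else if t = '[' then some ']'
    else if t = '{' then some '}' else if t = '(' then some ')' else none := by
  by_cases h1 : t = '<'
  · subst h1; decide
  by_cases h2 : t = '['
  · subst h2; decide
  by_cases h3 : t = '{'
  · subst h3; decide
  by_cases h4 : t = '('
  · subst h4; decide
  have e1 : ('<' == t) = false := by simp [beq_eq_false_iff_ne]; exact fun e => h1 e.symm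
  have e2 : ('[' == t) = false := by simp [beq_eq_false_iff_ne]; exact fun e => h2 e.symm
  have e3 : ('{' == t) = false := by simp [beq_eq_false_iff_ne]; exact fun e => h3 e.symm
  have e4 : ('(' == t) = false := by simp [beq_eq_false_iff_ne]; exact fun e => h4 e.symm
  simp [pairsDict, PySem.Dict.get?, List.find?, e1, e2, e3, e4, h1, h2, h3, h4]

-- o an opener: it is never the value of pairsDict, so stepB always pushes it
theorem stepB_push (o : Char) (ho : ∀ u, (PySem.Dict.get? pairsDict u == some o) = false)
    (s : List Char) : stepB s o = o :: s := by
  match s with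
  | [] => rfl
  | a :: rest => simp [stepB, ho a]

theorem foldl_stepB_pair (o c : Char)
    (hoc : PySem.Dict.get? pairsDict o = some c)
    (ho : ∀ u, (PySem.Dict.get? pairsDict u == some o) = false) :
    ∀ (t s : List Char), List.foldl stepB s (o :: c :: t) = List.foldl stepB s t := by
  intro t s
  simp only [List.foldl_cons]
  rw [stepB_push o ho s]
  have : stepB (o :: s) c = s := by simp [stepB, hoc]
  rw [this]

-- the stack fold is invariant under one full rep pass
theorem foldl_stepB_rep (o c : Char)
    (hoc : PySem.Dict.get? pairsDict o = some c)
    (ho : ∀ u, (PySem.Dict.get? pairsDict u == some o) = false)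
    (l : List Char) : ∀ s, List.foldl stepB s (rep o c l) = List.foldl stepB s l := by
  fun_induction rep o c l with
  | case1 => intro s; rfl
  | case2 x => intro s; rfl
  | case3 x y t h ih =>
    intro s
    obtain ⟨hx, hy⟩ := h
    rw [ih s, hx, hy]
    exact (foldl_stepB_pair o c hoc ho t s).symm
  | case4 x y t h ih =>
    intro s
    simp only [List.foldl_cons]
    exact ih (stepB s x)

theorem pget_not_opener (o : Char) (h : o = '<' ∨ o = '[' ∨ o = '{' ∨ o = '(') :
    ∀ u, (PySem.Dict.get? pairsDict u == some o) = false := by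
  intro u
  rw [pget_eq u]
  rcases h with h | h | h | h <;> subst h <;> split_ifs <;> decide

theorem foldl_stepB_replace4 (l : List Char) (s : List Char) :
    List.foldl stepB s (replace4 l) = List.foldl stepB s l := by
  unfold replace4
  rw [replace_eq_rep, replace_eq_rep, replace_eq_rep, replace_eq_rep]
  have hlt := foldl_stepB_rep '<' '>' (by decide) (pget_not_opener '<' (by simp))
  have hbr := foldl_stepB_rep '[' ']' (by decide) (pget_not_opener '[' (by simp))
  have hcu := foldl_stepB_rep '{' '}' (by decide) (pget_not_opener '{' (by simp))
  have hpa := foldl_stepB_rep '(' ')' (by decide) (pget_not_opener '(' (by simp))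
  rw [hpa _ s, hcu _ s, hbr _ s, hlt _ s]

-- irreducible: no adjacent matched pair
def irredB : List Char → Bool
  | a :: b :: t => !(PySem.Dict.get? pairsDict a == some b) && irredB (b :: t)
  | _ => true

theorem rep_fix_of_length (o c : Char) (l : List Char) :
    (rep o c l).length = l.length → rep o c l = l := by
  fun_induction rep o c l with
  | case1 => intro _; rfl
  | case2 x => intro _; rfl
  | case3 x y t hm ih =>
    intro h
    exfalso
    have := rep_length_le o c t
    simp only [List.length_cons] at h
    omega
  | case4 x y t hm ih =>
    intro h
    simp only [List.length_cons, Nat.add_right_cancel_iff] at h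
    rw [ih h]

theorem rep_fix_cons (o c x y : Char) (t : List Char)
    (h : rep o c (x :: y :: t) = x :: y :: t) :
    ¬(x = o ∧ y = c) ∧ rep o c (y :: t) = y :: t := by
  by_cases hm : x = o ∧ y = c
  · exfalso
    obtain ⟨hx, hy⟩ := hm
    rw [hx, hy] at h
    rw [show rep o c (o :: c :: t) = rep o c t from by simp [rep]] at h
    have h1 := rep_length_le o c t
    have h2 : (rep o c t).length = t.length + 2 := by rw [h]; simp
    omega
  · refine ⟨hm, ?_⟩
    simp only [rep, hm, if_false] at h
    exact (List.cons.injEq _ _ _ _).mp h |>.2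

theorem irred_of_fix : ∀ l : List Char,
    rep '<' '>' l = l → rep '[' ']' l = l → rep '{' '}' l = l → rep '(' ')' l = l →
    irredB l = true := by
  intro l
  induction l with
  | nil => intro _ _ _ _; rfl
  | cons a l' ih =>
    intro h1 h2 h3 h4
    match l' with
    | [] => rfl
    | b :: t =>
      obtain ⟨n1, h1'⟩ := rep_fix_cons _ _ _ _ _ h1
      obtain ⟨n2, h2'⟩ := rep_fix_cons _ _ _ _ _ h2
      obtain ⟨n3, h3'⟩ := rep_fix_cons _ _ _ _ _ h3
      obtain ⟨n4, h4'⟩ := rep_fix_cons _ _ _ _ _ h4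
      have hnm : (PySem.Dict.get? pairsDict a == some b) = false := by
        rw [pget_eq a]
        split_ifs with c1 c2 c3 c4
        · simp only [beq_eq_false_iff_ne, ne_eq, Option.some.injEq]
          exact fun e => n1 ⟨c1, e.symm⟩
        · simp only [beq_eq_false_iff_ne, ne_eq, Option.some.injEq]
          exact fun e => n2 ⟨c2, e.symm⟩
        · simp only [beq_eq_false_iff_ne, ne_eq, Option.some.injEq]
          exact fun e => n3 ⟨c3, e.symm⟩
        · simp only [beq_eq_false_iff_ne, ne_eq, Option.some.injEq]
          exact fun e => n4 ⟨c4, e.symm⟩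
        · simp
      simp only [irredB, hnm, Bool.not_false, Bool.true_and]
      exact ih h1' h2' h3' h4'

-- the stack pass leaves an irreducible string untouched (reversed onto the stack)
theorem stack_of_irred : ∀ (l s : List Char), irredB l = true →
    (∀ a b, s.head? = some a → l.head? = some b → (PySem.Dict.get? pairsDict a == some b) = false) →
    List.foldl stepB s l = l.reverse ++ s := by
  intro l
  induction l with
  | nil => intro s _ _; simp
  | cons x t ih =>
    intro s hirr hhd
    have hstep : stepB s x = x :: s := by
      match s with
      | [] => rfl
      | a :: rest =>
        have := hhd a x rfl rfl
        simp [stepB, this]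
    simp only [List.foldl_cons, hstep]
    have hirr' : irredB t = true := by
      cases t with
      | nil => rfl
      | cons b t' => simp only [irredB, Bool.and_eq_true] at hirr; exact hirr.2
    have hhd' : ∀ a b, (x :: s).head? = some a → t.head? = some b →
        (PySem.Dict.get? pairsDict a == some b) = false := by
      intro a b ha hb
      simp only [List.head?_cons, Option.some.injEq] at ha
      subst ha
      cases t with
      | nil => simp at hb
      | cons b0 t' =>
        simp only [List.head?_cons, Option.some.injEq] at hb
        subst hb
        simp only [irredB, Bool.and_eq_true, Bool.not_eq_true'] at hirr
        exact hirr.1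
    rw [ih (x :: s) hirr' hhd']
    simp

theorem loopA_stack (l : List Char) (ls : Nat) (s : List Char) :
    List.foldl stepB s (loopA l ls) = List.foldl stepB s l := by
  fun_induction loopA l ls with
  | case1 l1 => rfl
  | case2 l1 ls1 hc ih => rw [ih, foldl_stepB_replace4]

theorem replace4_fix_of_length (l : List Char) (h : (replace4 l).length = l.length) :
    rep '<' '>' l = l ∧ rep '[' ']' l = l ∧ rep '{' '}' l = l ∧ rep '(' ')' l = l := by
  have e : replace4 l = rep '(' ')' (rep '{' '}' (rep '[' ']' (rep '<' '>' l))) := by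
    unfold replace4
    rw [replace_eq_rep, replace_eq_rep, replace_eq_rep, replace_eq_rep]
  rw [e] at h
  have l1 := rep_length_le '<' '>' l
  have l2 := rep_length_le '[' ']' (rep '<' '>' l)
  have l3 := rep_length_le '{' '}' (rep '[' ']' (rep '<' '>' l))
  have l4 := rep_length_le '(' ')' (rep '{' '}' (rep '[' ']' (rep '<' '>' l)))
  have e1 : rep '<' '>' l = l := rep_fix_of_length _ _ _ (by omega)
  rw [e1] at h l2 l3 l4 ⊢
  have e2 : rep '[' ']' l = l := rep_fix_of_length _ _ _ (by omega)
  rw [e2] at h l3 l4 ⊢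
  have e3 : rep '{' '}' l = l := rep_fix_of_length _ _ _ (by omega)
  rw [e3] at h l4 ⊢
  have e4 : rep '(' ')' l = l := rep_fix_of_length _ _ _ (by omega)
  exact ⟨rfl, rfl, rfl, e4⟩

theorem loopA_irred (l : List Char) (ls : Nat) (h0 : ls = l.length → irredB l = true) :
    irredB (loopA l ls) = true := by
  fun_induction loopA l ls with
  | case1 l1 => exact h0 rfl
  | case2 l1 ls1 hc ih =>
    apply ih
    intro hlen
    obtain ⟨e1, e2, e3, e4⟩ := replace4_fix_of_length l1 hlen.symm
    have heq : replace4 l1 = l1 := by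
      unfold replace4
      rw [replace_eq_rep, replace_eq_rep, replace_eq_rep, replace_eq_rep, e1, e2, e3, e4]
    rw [heq]
    exact irred_of_fix l1 e1 e2 e3 e4

theorem scanB_eq_scanA : ∀ l : List Char, scanB l = scanA l := by
  intro l
  induction l with
  | nil => rfl
  | cons c t ih =>
    simp only [scanA, scanB]
    cases PySem.Dict.get? illegalDict c <;> simp [ih]

theorem line_eq (l : List Char) :
    scanB (List.foldl stepB [] l).reverse = scanA (loopA l 0) := by
  have hirr : irredB (loopA l 0) = true := by
    apply loopA_irred
    intro h
    have : l = [] := List.eq_nil_of_length_eq_zero h.symm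
    subst this; rfl
  have hstack : List.foldl stepB [] l = (loopA l 0).reverse := by
    rw [← loopA_stack l 0 []]
    rw [stack_of_irred (loopA l 0) [] hirr (by intro a b ha; simp at ha)]
    simp
  rw [hstack, List.reverse_reverse, scanB_eq_scanA]

theorem fold_eq : ∀ (data : List String) (acc : Int),
    data.foldl (fun score line => score + scanA (loopA line.toList 0)) acc =
    data.foldl (fun score line =>
      let stack := line.toList.foldl stepB []
      score + scanB stack.reverse) acc := by
  intro data
  induction data with
  | nil => intro acc; rfl
  | cons line rest ih =>
    intro acc
    simp only [List.foldl_cons]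
    rw [line_eq line.toList, ih]

-- ===== VERDICT (by name: the statement is the Claim_ definition above) =====
theorem solve_spec : Claim_equal_solve := by
  intro data _
  unfold Spec_solve solve solve_alt
  exact fold_eq data 0
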